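-- pv_equiv track=rewrite | github.com/narranoid/Blender-Texture-Grapher | stringfiddle/util.py | is_abbreviation_of
-- ===== SOURCE A (Python) =====
-- def is_abbreviation_of(abbreviation, word):
--     if len(word) <= 0 or len(abbreviation) <= 0 or word[0] != abbreviation[0]:
--         return False
--
--     word_index = 1
--     abbreviation_index = 1
--     while abbreviation_index < len(abbreviation) and word_index < len(word):
--         if word[word_index] == abbreviation[abbreviation_index]:
--             abbreviation_index += 1
--         word_index += 1
--     return abbreviation_index == len(abbreviation)
-- ===== SOURCE B (Python) =====
-- def is_abbreviation_of(abbreviation, word):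
--     if len(word) <= 0 or len(abbreviation) <= 0 or word[0] != abbreviation[0]:
--         return False
--     pending = list(abbreviation[1:])
--     for ch in reversed(word[1:]):
--         if pending and ch == pending[-1]:
--             pending.pop()
--     return not pending
-- ===== Notes on version B (the rewrite author's own statement) =====
-- stated objective: alternative
-- what changed: B matches back-to-front: it scans the word tail in reverse while popping pending abbreviation characters off the end of a stack, instead of A's forward walk with two integer indices; correctness rests on the greedy subsequence match being direction-independent.
import Mathlib
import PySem

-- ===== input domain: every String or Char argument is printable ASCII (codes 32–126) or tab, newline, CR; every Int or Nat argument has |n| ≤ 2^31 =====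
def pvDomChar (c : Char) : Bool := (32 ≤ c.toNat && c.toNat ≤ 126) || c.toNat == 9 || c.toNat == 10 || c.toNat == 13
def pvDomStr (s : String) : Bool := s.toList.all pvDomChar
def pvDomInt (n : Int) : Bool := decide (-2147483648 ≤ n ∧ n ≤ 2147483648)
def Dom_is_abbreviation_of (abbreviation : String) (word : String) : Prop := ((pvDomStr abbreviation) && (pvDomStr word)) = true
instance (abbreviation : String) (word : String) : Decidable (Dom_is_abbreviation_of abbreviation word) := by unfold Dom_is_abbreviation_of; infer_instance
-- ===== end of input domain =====

-- B checks the subsequence back-to-front (reverse scan of the word popping a stack of pending abbreviation chars) instead of A's forward two-index walk; same cost, genuinely different traversal.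


-- ===== PORT A =====
-- the while loop: returns the final abbreviation_index
def loopA (ab w : List Char) (ai wi : Nat) : Nat :=
  if h : ai < ab.length ∧ wi < w.length then
    if w.getD wi default == ab.getD ai default then loopA ab w (ai + 1) (wi + 1)
    else loopA ab w ai (wi + 1)
  else ai
termination_by w.length - wi
decreasing_by all_goals omega

def is_abbreviation_of (abbreviation : String) (word : String) : Bool :=
  let ab := abbreviation.toList
  let w := word.toList
  if w.length ≤ 0 || ab.length ≤ 0 || (w.getD 0 default != ab.getD 0 default) then false
  else loopA ab w 1 1 == ab.length

-- ===== PORT B =====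
-- the for loop over reversed(word[1:]): pending stack popped from the end
def chaseRev (pend : List Char) (chars : List Char) : List Char :=
  match chars with
  | [] => pend
  | ch :: rest =>
      chaseRev (if pend ≠ [] ∧ pend.getLast? = some ch then pend.dropLast else pend) rest

def is_abbreviation_of_alt (abbreviation : String) (word : String) : Bool :=
  let ab := abbreviation.toList
  let w := word.toList
  if w.length ≤ 0 || ab.length ≤ 0 || (w.getD 0 default != ab.getD 0 default) then false
  else (chaseRev (ab.drop 1) ((w.drop 1).reverse)).isEmpty

-- ===== PRECONDITION & SPEC =====
def Spec_is_abbreviation_of (abbreviation : String) (word : String) (out : Bool) : Prop := out = is_abbreviation_of_alt abbreviation word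
instance (abbreviation : String) (word : String) (out : Bool) : Decidable (Spec_is_abbreviation_of abbreviation word out) := by unfold Spec_is_abbreviation_of; infer_instance

-- ===== CLAIM =====
def Claim_equal_is_abbreviation_of : Prop := ∀ (abbreviation : String) (word : String), Dom_is_abbreviation_of abbreviation word → Spec_is_abbreviation_of abbreviation word (is_abbreviation_of abbreviation word)

-- ===== LEMMAS AND PROOFS =====
-- forward greedy residual of the subsequence match
def res : List Char → List Char → List Char
  | [], _ => []
  | p, [] => p
  | a :: as, c :: cs => if c == a then res as cs else res (a :: as) cs

theorem res_nil (p : List Char) : res p [] = p := by cases p <;> rfl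

theorem res_cons (a c : Char) (as cs : List Char) :
    res (a :: as) (c :: cs) = if c == a then res as cs else res (a :: as) cs := rfl

-- characterisation of A's loop: final index reaches the end iff forward greedy leaves no residual
theorem loopA_eq_res (n : Nat) : ∀ (ab w : List Char) (ai wi : Nat),
    w.length - wi ≤ n → ai ≤ ab.length →
    (loopA ab w ai wi == ab.length) = (res (ab.drop ai) (w.drop wi)).isEmpty := by
  induction n with
  | zero =>
    intro ab w ai wi hn hai
    rw [loopA]
    have h2 : ¬ wi < w.length := by omega
    rw [dif_neg (by tauto)]
    have hwd : w.drop wi = [] := List.drop_eq_nil_of_le (by omega)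
    rw [hwd, res_nil, Bool.eq_iff_iff]
    simp only [beq_iff_eq, List.isEmpty_iff, List.drop_eq_nil_iff]
    omega
  | succ n ih =>
    intro ab w ai wi hn hai
    rw [loopA]
    by_cases h : ai < ab.length ∧ wi < w.length
    · rw [dif_pos h]
      obtain ⟨h1, h2⟩ := h
      have hw : w.getD wi default = w[wi] := List.getD_eq_getElem _ _ h2
      have ha : ab.getD ai default = ab[ai] := List.getD_eq_getElem _ _ h1
      rw [List.drop_eq_getElem_cons h1, List.drop_eq_getElem_cons h2, res_cons, hw, ha]
      by_cases heq : w[wi] = ab[ai]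
      · rw [if_pos (by simpa using heq), if_pos (by simpa using heq)]
        exact ih ab w (ai + 1) (wi + 1) (by omega) (by omega)
      · rw [if_neg (by simpa using heq), if_neg (by simpa using heq)]
        rw [← List.drop_eq_getElem_cons h1]
        exact ih ab w ai (wi + 1) (by omega) hai
    · rw [dif_neg h]
      by_cases hend : ai = ab.length
      · subst hend
        simp [List.drop_length, res]
      · have h1 : ai < ab.length := lt_of_le_of_ne hai hend
        have h2 : ¬ wi < w.length := fun hc => h ⟨h1, hc⟩
        have hwd : w.drop wi = [] := List.drop_eq_nil_of_le (by omega)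
        rw [hwd, res_nil, Bool.eq_iff_iff]
        simp only [beq_iff_eq, List.isEmpty_iff, List.drop_eq_nil_iff]
        omega

-- forward greedy decides the subsequence relation
theorem res_eq_nil_iff (w : List Char) : ∀ p : List Char, res p w = [] ↔ List.Sublist p w := by
  induction w with
  | nil =>
    intro p
    cases p with
    | nil => simp [res]
    | cons a as => simp [res]
  | cons c cs ih =>
    intro p
    cases p with
    | nil => simp [res]
    | cons a as =>
      rw [res_cons]
      by_cases heq : c = a
      · subst heq
        rw [if_pos (by simp)]
        rw [ih as, List.cons_sublist_cons]
      · rw [if_neg (by simpa using heq)]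
        rw [ih (a :: as)]
        constructor
        · intro h; exact h.cons c
        · intro h
          cases h with
          | cons _ h => exact h
          | cons₂ => exact absurd rfl heq

-- the backward stack scan computes the reverse of the forward greedy residual of the reverses
theorem chaseRev_eq (l : List Char) : ∀ pend : List Char,
    chaseRev pend l = (res pend.reverse l).reverse := by
  induction l with
  | nil =>
    intro pend
    rw [chaseRev, res_nil, List.reverse_reverse]
  | cons ch rest ih =>
    intro pend
    rw [chaseRev, ih]
    cases hp : pend.reverse with
    | nil =>
      have hpe : pend = [] := by simpa using congrArg List.reverse hp
      subst hpe
      rw [if_neg (by simp)]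
      simp [res]
    | cons b bs =>
      have hpend : pend = bs.reverse ++ [b] := by
        have := congrArg List.reverse hp
        simpa using this
      have hlast : pend.getLast? = some b := by rw [hpend]; simp
      rw [res_cons]
      by_cases heq : ch = b
      · subst heq
        rw [if_pos ⟨by simp [hpend], by rw [hlast]⟩, if_pos (by simp)]
        have hdrop : pend.dropLast = bs.reverse := by
          rw [hpend]; exact List.dropLast_concat
        rw [hdrop, List.reverse_reverse]
      · rw [if_neg (by simp [hlast]; intro _ hb; exact heq hb.symm), hp, if_neg (by simpa using heq)]

theorem is_abbreviation_of_spec : Claim_equal_is_abbreviation_of := by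
  intro abbreviation word _
  unfold Spec_is_abbreviation_of is_abbreviation_of is_abbreviation_of_alt
  cases hab : abbreviation.toList with
  | nil => simp
  | cons a as =>
    cases hw : word.toList with
    | nil => simp
    | cons c cs =>
      simp only [List.length_cons, List.getD_cons_zero]
      by_cases hcc : c = a
      · subst hcc
        rw [if_neg (by simp), if_neg (by simp)]
        have hA := loopA_eq_res ((c :: cs).length - 1) (c :: as) (c :: cs) 1 1
          (by simp) (by simp)
        simp only [List.drop_one, List.tail_cons, List.length_cons] at hA
        rw [hA]
        rw [List.drop_one, List.drop_one, List.tail_cons, List.tail_cons]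
        rw [chaseRev_eq]
        rw [Bool.eq_iff_iff]
        simp only [List.isEmpty_iff, List.reverse_eq_nil_iff]
        rw [res_eq_nil_iff, res_eq_nil_iff, List.reverse_sublist]
      · rw [if_pos (by simp [hcc]), if_pos (by simp [hcc])]

-- ===== VERDICT =====
-- (theorem is_abbreviation_of_spec above proves Claim_equal_is_abbreviation_of)
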